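-- pv_equiv track=rewrite | github.com/Felma11/segmentation | src/continual_learning/oracles/oracle.py | class_tp_tn_fp_fn
-- ===== SOURCE A (Python) =====
-- def class_tp_tn_fp_fn(prediction, target, label=1):
--     targets_label = [1 if x==label else 0 for x in target]
--     predictions_label = [1 if x==label else 0 for x in prediction]
--     tp, tn, fp, fn = 0, 0, 0, 0
--     for i in range(len(targets_label)):
--         if targets_label[i] == 1:
--             if predictions_label[i] == 1:
--                 tp += 1
--             else:
--                 fn += 1
--         else:
--             if predictions_label[i] == 1:
--                 fp += 1
--             else:
--                 tn += 1
--     return tp, tn, fp, fn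
-- ===== SOURCE B (Python) =====
-- def class_tp_tn_fp_fn(prediction, target, label=1):
--     # one pass keeping marginal counts; the confusion cells follow algebraically
--     tp, tpos, ppos = 0, 0, 0
--     for i in range(len(target)):
--         t = target[i] == label
--         p = prediction[i] == label
--         tp += int(t and p)
--         tpos += int(t)
--         ppos += int(p)
--     fn = tpos - tp
--     fp = ppos - tp
--     tn = len(target) - tp - fn - fp
--     return tp, tn, fp, fn
-- ===== Notes on version B (the rewrite author's own statement) =====
-- stated objective: simpler
-- what changed: Replaces the two 0/1 indicator lists plus a four-way nested case analysis with a single pass maintaining three marginal counters (tp, #target==label, #prediction==label), from which fn, fp and tn are derived algebraically after the loop.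
import Mathlib
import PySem

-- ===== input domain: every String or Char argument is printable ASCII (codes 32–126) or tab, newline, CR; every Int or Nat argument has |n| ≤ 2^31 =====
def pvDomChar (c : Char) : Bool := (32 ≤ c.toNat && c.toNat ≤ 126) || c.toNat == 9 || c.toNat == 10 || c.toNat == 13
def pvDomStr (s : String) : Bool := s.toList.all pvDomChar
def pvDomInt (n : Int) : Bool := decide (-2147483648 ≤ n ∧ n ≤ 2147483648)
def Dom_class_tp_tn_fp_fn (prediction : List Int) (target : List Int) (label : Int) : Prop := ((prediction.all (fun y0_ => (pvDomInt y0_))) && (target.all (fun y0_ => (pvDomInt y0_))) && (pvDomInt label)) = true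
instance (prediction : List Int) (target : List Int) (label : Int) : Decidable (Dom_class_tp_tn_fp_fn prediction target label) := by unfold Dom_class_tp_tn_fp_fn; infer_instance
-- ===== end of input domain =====

-- B replaces A's indicator lists and nested case analysis by one pass over three
-- marginal counters plus algebraic identities (objective: simpler).


-- ===== PORT A =====
-- the body of A's for-loop over i (state (tp, tn, fp, fn))
def pvStepA (tl pl : List Int) (st : Int × Int × Int × Int) (i : Int) : Int × Int × Int × Int :=
  if PySem.List.pyGetD tl i 0 == 1 then
    if PySem.List.pyGetD pl i 0 == 1 then (st.1 + 1, st.2.1, st.2.2.1, st.2.2.2)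
    else (st.1, st.2.1, st.2.2.1, st.2.2.2 + 1)
  else
    if PySem.List.pyGetD pl i 0 == 1 then (st.1, st.2.1, st.2.2.1 + 1, st.2.2.2)
    else (st.1, st.2.1 + 1, st.2.2.1, st.2.2.2)

def class_tp_tn_fp_fn (prediction : List Int) (target : List Int) (label : Int) : Int × Int × Int × Int :=
  let targetsLabel := target.map (fun x => if x == label then (1 : Int) else 0)
  let predictionsLabel := prediction.map (fun x => if x == label then (1 : Int) else 0)
  (PySem.List.pyRange 0 (targetsLabel.length : Int) 1).foldl
    (pvStepA targetsLabel predictionsLabel) (0, 0, 0, 0)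

-- ===== PORT B =====
-- the body of B's for-loop over i (state (tp, tpos, ppos))
def pvStepB (prediction target : List Int) (label : Int) (st : Int × Int × Int) (i : Int) : Int × Int × Int :=
  let t := PySem.List.pyGetD target i 0 == label
  let p := PySem.List.pyGetD prediction i 0 == label
  (st.1 + (if t && p then 1 else 0), st.2.1 + (if t then 1 else 0), st.2.2 + (if p then 1 else 0))

def class_tp_tn_fp_fn_alt (prediction : List Int) (target : List Int) (label : Int) : Int × Int × Int × Int :=
  let st := (PySem.List.pyRange 0 (target.length : Int) 1).foldl
    (pvStepB prediction target label) (0, 0, 0)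
  let fn := st.2.1 - st.1
  let fp := st.2.2 - st.1
  (st.1, (target.length : Int) - st.1 - fn - fp, fp, fn)

-- ===== PRECONDITION & SPEC =====
-- A indexes predictions_label[i] for every i < len(target): an IndexError when
-- prediction is shorter than target, so exactly those inputs are excluded.
def Pre_class_tp_tn_fp_fn (prediction : List Int) (target : List Int) (label : Int) : Prop :=
  target.length ≤ prediction.length
instance (prediction : List Int) (target : List Int) (label : Int) : Decidable (Pre_class_tp_tn_fp_fn prediction target label) := by unfold Pre_class_tp_tn_fp_fn; infer_instance
def pvWitness_class_tp_tn_fp_fn : List Int × List Int × Int := ([1, 0, 2, 1], [1, 1, 0], 1)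

def Spec_class_tp_tn_fp_fn (prediction : List Int) (target : List Int) (label : Int) (out : Int × Int × Int × Int) : Prop := out = class_tp_tn_fp_fn_alt prediction target label
instance (prediction : List Int) (target : List Int) (label : Int) (out : Int × Int × Int × Int) : Decidable (Spec_class_tp_tn_fp_fn prediction target label out) := by unfold Spec_class_tp_tn_fp_fn; infer_instance

-- ===== CLAIM (what is proved, stated in full; the proofs are below) =====
def Claim_equal_class_tp_tn_fp_fn : Prop := ∀ (prediction : List Int) (target : List Int) (label : Int), Dom_class_tp_tn_fp_fn prediction target label → Pre_class_tp_tn_fp_fn prediction target label → Spec_class_tp_tn_fp_fn prediction target label (class_tp_tn_fp_fn prediction target label)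

-- ===== LEMMAS AND PROOFS =====

-- loop invariant: after n steps B's marginal counters are determined by A's four cells,
-- and A's four cells sum to n.
lemma pv_loop_inv (prediction target : List Int) (label : Int)
    (hp : target.length ≤ prediction.length) (n : Nat) (hn : n ≤ target.length) :
    (((PySem.List.pyRange 0 (n : Int) 1).foldl (pvStepB prediction target label) (0, 0, 0)).1
        = ((PySem.List.pyRange 0 (n : Int) 1).foldl
            (pvStepA (target.map (fun x => if x == label then (1 : Int) else 0))
                     (prediction.map (fun x => if x == label then (1 : Int) else 0)))
            (0, 0, 0, 0)).1) ∧
    (((PySem.List.pyRange 0 (n : Int) 1).foldl (pvStepB prediction target label) (0, 0, 0)).2.1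
        = ((PySem.List.pyRange 0 (n : Int) 1).foldl
            (pvStepA (target.map (fun x => if x == label then (1 : Int) else 0))
                     (prediction.map (fun x => if x == label then (1 : Int) else 0)))
            (0, 0, 0, 0)).1
          + ((PySem.List.pyRange 0 (n : Int) 1).foldl
            (pvStepA (target.map (fun x => if x == label then (1 : Int) else 0))
                     (prediction.map (fun x => if x == label then (1 : Int) else 0)))
            (0, 0, 0, 0)).2.2.2) ∧
    (((PySem.List.pyRange 0 (n : Int) 1).foldl (pvStepB prediction target label) (0, 0, 0)).2.2
        = ((PySem.List.pyRange 0 (n : Int) 1).foldl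
            (pvStepA (target.map (fun x => if x == label then (1 : Int) else 0))
                     (prediction.map (fun x => if x == label then (1 : Int) else 0)))
            (0, 0, 0, 0)).1
          + ((PySem.List.pyRange 0 (n : Int) 1).foldl
            (pvStepA (target.map (fun x => if x == label then (1 : Int) else 0))
                     (prediction.map (fun x => if x == label then (1 : Int) else 0)))
            (0, 0, 0, 0)).2.2.1) ∧
    (((PySem.List.pyRange 0 (n : Int) 1).foldl
            (pvStepA (target.map (fun x => if x == label then (1 : Int) else 0))
                     (prediction.map (fun x => if x == label then (1 : Int) else 0)))
            (0, 0, 0, 0)).1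
      + ((PySem.List.pyRange 0 (n : Int) 1).foldl
            (pvStepA (target.map (fun x => if x == label then (1 : Int) else 0))
                     (prediction.map (fun x => if x == label then (1 : Int) else 0)))
            (0, 0, 0, 0)).2.1
      + ((PySem.List.pyRange 0 (n : Int) 1).foldl
            (pvStepA (target.map (fun x => if x == label then (1 : Int) else 0))
                     (prediction.map (fun x => if x == label then (1 : Int) else 0)))
            (0, 0, 0, 0)).2.2.1
      + ((PySem.List.pyRange 0 (n : Int) 1).foldl
            (pvStepA (target.map (fun x => if x == label then (1 : Int) else 0))
                     (prediction.map (fun x => if x == label then (1 : Int) else 0)))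
            (0, 0, 0, 0)).2.2.2 = (n : Int)) := by
  induction n with
  | zero => simp [PySem.List.pyRange_one_eq_nil]
  | succ n ih =>
    have hn' : n ≤ target.length := Nat.le_of_succ_le hn
    have hlt : n < target.length := hn
    have hltp : n < prediction.length := lt_of_lt_of_le hlt hp
    have hr : PySem.List.pyRange 0 ((n + 1 : Nat) : Int) 1
        = PySem.List.pyRange 0 (n : Int) 1 ++ [(n : Int)] := by
      push_cast
      exact PySem.List.pyRange_one_succ_right (by positivity)
    obtain ⟨h1, h2, h3, h4⟩ := ih hn'
    simp only [beq_iff_eq] at h1 h2 h3 h4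
    have hgt : PySem.List.pyGetD (target.map (fun x => if x == label then (1 : Int) else 0)) (n : Int) 0
        = (if target[n] == label then (1 : Int) else 0) := by
      rw [PySem.List.pyGetD_natCast]
      simp [List.getD, hlt]
    have hgp : PySem.List.pyGetD (prediction.map (fun x => if x == label then (1 : Int) else 0)) (n : Int) 0
        = (if prediction[n] == label then (1 : Int) else 0) := by
      rw [PySem.List.pyGetD_natCast]
      simp [List.getD, hltp]
    have hgt' : PySem.List.pyGetD target (n : Int) 0 = target[n] := by
      rw [PySem.List.pyGetD_natCast]; simp [List.getD, hlt]
    have hgp' : PySem.List.pyGetD prediction (n : Int) 0 = prediction[n] := by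
      rw [PySem.List.pyGetD_natCast]; simp [List.getD, hltp]
    rw [hr]
    simp only [List.foldl_append, List.foldl_cons, List.foldl_nil]
    by_cases ht : target[n] == label <;> by_cases hpp : prediction[n] == label <;>
      simp only [pvStepA, pvStepB, hgt, hgp, hgt', hgp', ht, hpp] <;>
      simp <;> omega

-- ===== VERDICT (by name: the statement is the Claim_ definition above) =====
theorem class_tp_tn_fp_fn_spec : Claim_equal_class_tp_tn_fp_fn := by
  intro prediction target label _ hpre
  unfold Spec_class_tp_tn_fp_fn class_tp_tn_fp_fn class_tp_tn_fp_fn_alt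
  obtain ⟨h1, h2, h3, h4⟩ := pv_loop_inv prediction target label hpre target.length le_rfl
  simp only [List.length_map]
  refine Prod.ext ?_ (Prod.ext ?_ (Prod.ext ?_ ?_)) <;> simp only [] <;> omega
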